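-- pv_equiv track=rewrite | github.com/Kist0/Exercises | Exercícios de python/Teste.py | removeParteDiamante
-- ===== SOURCE A (Python) =====
-- def removeParteDiamante(linha, posicao):
--     tamanho = len(linha) - 1
--     linhaAux = [''] * tamanho
--     for i in range(tamanho, 0, -1):
--         if i != posicao:
--             linhaAux[tamanho - i] = linha[i]
--
--     tamanho = len(linhaAux)
--     linha = [''] * (tamanho)
--     for j in range(tamanho - 1, -1, -1):
--         linha[tamanho - 1 - j] = linhaAux[j]
--
--     return linha
-- ===== SOURCE B (Python) =====
-- def removeParteDiamante(linha, posicao):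
--     # A's two reversal passes cancel: the result is linha[1:] with the element
--     # at posicao blanked (when posicao is a valid index 1..len(linha)-1).
--     res = list(linha[1:])
--     if 1 <= posicao <= len(linha) - 1:
--         res[posicao - 1] = ''
--     return res
-- ===== Notes on version B (the rewrite author's own statement) =====
-- stated objective: simpler
-- what changed: Replaced A's two descending index loops over two scratch arrays (build a reversed copy skipping posicao, then reverse it again) by the observation that the two reversals cancel: B takes the slice linha[1:] and blanks the single index posicao-1 when 1 <= posicao <= len(linha)-1 (one slice instead of two element-by-element Python loops).
import Mathlib
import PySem

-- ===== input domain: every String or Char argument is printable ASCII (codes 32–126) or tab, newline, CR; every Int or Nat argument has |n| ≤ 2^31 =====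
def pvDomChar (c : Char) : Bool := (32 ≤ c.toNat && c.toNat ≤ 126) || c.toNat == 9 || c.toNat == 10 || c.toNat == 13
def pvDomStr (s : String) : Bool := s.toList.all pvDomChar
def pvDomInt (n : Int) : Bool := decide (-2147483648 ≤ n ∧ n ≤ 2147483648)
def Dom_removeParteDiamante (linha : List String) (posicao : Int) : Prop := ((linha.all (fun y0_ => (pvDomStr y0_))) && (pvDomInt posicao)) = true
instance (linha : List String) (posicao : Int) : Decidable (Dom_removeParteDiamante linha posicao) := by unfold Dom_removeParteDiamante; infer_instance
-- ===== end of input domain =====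

-- B replaces A's two descending copy loops (build a reversed copy skipping posicao, then
-- reverse it again) by the observation that the two reversals cancel: B returns linha[1:]
-- with index posicao-1 blanked when 1 ≤ posicao ≤ len(linha)-1.

-- ===== PORT A =====
def removeParteDiamante (linha : List String) (posicao : Int) : List String :=
  let tamanho : Int := (linha.length : Int) - 1
  -- [''] * tamanho: Python yields [] for a negative count; Int.toNat matches that exactly
  let linhaAux : List String := List.replicate tamanho.toNat ""
  let linhaAux := (PySem.List.pyRange tamanho 0 (-1)).foldl
    (fun aux i => if i ≠ posicao then PySem.List.pySetD aux (tamanho - i) (PySem.List.pyGetD linha i "") else aux) linhaAux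
  let tamanho2 : Int := (linhaAux.length : Int)
  let linha2 : List String := List.replicate tamanho2.toNat ""
  (PySem.List.pyRange (tamanho2 - 1) (-1) (-1)).foldl
    (fun l j => PySem.List.pySetD l (tamanho2 - 1 - j) (PySem.List.pyGetD linhaAux j "")) linha2

-- ===== PORT B =====
def removeParteDiamante_alt (linha : List String) (posicao : Int) : List String :=
  let res := PySem.List.slice linha (some 1) none
  if 1 ≤ posicao ∧ posicao ≤ (linha.length : Int) - 1 then
    PySem.List.pySetD res (posicao - 1) "" else res

-- ===== PRECONDITION & SPEC =====
def Spec_removeParteDiamante (linha : List String) (posicao : Int) (out : List String) : Prop := out = removeParteDiamante_alt linha posicao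
instance (linha : List String) (posicao : Int) (out : List String) : Decidable (Spec_removeParteDiamante linha posicao out) := by unfold Spec_removeParteDiamante; infer_instance

-- ===== CLAIM (what is proved, stated in full; the proofs are below) =====
def Claim_equal_removeParteDiamante : Prop := ∀ (linha : List String) (posicao : Int), Dom_removeParteDiamante linha posicao → Spec_removeParteDiamante linha posicao (removeParteDiamante linha posicao)

-- ===== LEMMAS AND PROOFS =====

-- a foldl whose body preserves the list length preserves the list length
theorem pvFoldlLength {α β : Type} (body : List α → β → List α)
    (h : ∀ l b, (body l b).length = l.length) :
    ∀ (r : List β) (init : List α), (r.foldl body init).length = init.length := by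
  intro r
  induction r with
  | nil => intro init; rfl
  | cons b r ih => intro init; simp [List.foldl_cons, ih, h]

-- first loop of A, pointwise: after running i = a, a-1, …, 1, cell k holds getv (t-k)
-- unless that write was skipped (t-k = p) or never attempted (k < t-a)
theorem pvLoop1Get (getv : Int → String) (p : Int) (t : Nat) :
    ∀ (a : Nat), a ≤ t → ∀ (aux : List String), aux.length = t → ∀ (k : Nat), k < t →
    ((PySem.List.pyRange (a : Int) 0 (-1)).foldl
      (fun aux i => if i ≠ p then PySem.List.pySetD aux ((t : Int) - i) (getv i) else aux) aux)[k]? =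
    if t - a ≤ k ∧ ((t : Int) - (k : Int)) ≠ p then some (getv ((t : Int) - (k : Int))) else aux[k]? := by
  intro a
  induction a with
  | zero =>
    intro _ aux _ k hk
    rw [PySem.List.pyRange_neg_one_eq_nil (by omega)]
    simp only [List.foldl_nil]
    rw [if_neg (by omega)]
  | succ a ih =>
    intro ha aux haux k hk
    rw [PySem.List.pyRange_neg_one_cons (by push_cast; omega)]
    simp only [List.foldl_cons]
    push_cast
    have hcast : (a : Int) + 1 - 1 = (a : Int) := by ring
    rw [hcast]
    by_cases hp : (a : Int) + 1 = p
    · rw [if_neg (not_not_intro hp)]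
      rw [ih (by omega) aux haux k hk]
      split_ifs with h1 h2 h2 <;> try rfl
      · exact absurd ⟨by omega, h1.2⟩ h2
      · exfalso
        have h3 : ¬(t - a ≤ k) := fun h => h1 ⟨h, h2.2⟩
        exact h2.2 (by omega)
    · rw [if_pos hp]
      have hidx : (t : Int) - ((a : Int) + 1) = (((t - (a + 1) : Nat)) : Int) := by omega
      rw [hidx, PySem.List.pySetD_natCast]
      have hlen : (aux.set (t - (a + 1)) (getv ((a : Int) + 1))).length = t := by
        simp [haux]
      rw [ih (by omega) _ hlen k hk]
      split_ifs with h1 h2 h2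
      · rfl
      · exact absurd ⟨by omega, h1.2⟩ h2
      · have hkk : t - (a + 1) = k := by
          have h3 : ¬(t - a ≤ k) := fun h => h1 ⟨h, h2.2⟩
          omega
        rw [hkk, List.getElem?_set_eq_of_lt _ (by omega)]
        have : (t : Int) - (k : Int) = ((a : Int) + 1) := by omega
        rw [this]
      · have hkk : t - (a + 1) ≠ k := by
          intro hc
          rcases not_and_or.mp h2 with h | h
          · omega
          · exact hp (by omega)
        rw [List.getElem?_set_ne hkk]

-- second loop of A, pointwise: after running j = a-1, …, 0, cell k holds aux[t-1-k]
theorem pvLoop2Get (aux : List String) (t : Nat) (ht : aux.length = t) :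
    ∀ (a : Nat), a ≤ t → ∀ (l : List String), l.length = t → ∀ (k : Nat), k < t →
    ((PySem.List.pyRange ((a : Int) - 1) (-1) (-1)).foldl
      (fun l j => PySem.List.pySetD l ((t : Int) - 1 - j) (PySem.List.pyGetD aux j "")) l)[k]? =
    if t - a ≤ k then aux[t - 1 - k]? else l[k]? := by
  intro a
  induction a with
  | zero =>
    intro _ l _ k hk
    rw [PySem.List.pyRange_neg_one_eq_nil (by omega)]
    simp only [List.foldl_nil]
    rw [if_neg (by omega)]
  | succ a ih =>
    intro ha l hl k hk
    rw [PySem.List.pyRange_neg_one_cons (by push_cast; omega)]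
    simp only [List.foldl_cons]
    push_cast
    have hc1 : (a : Int) + 1 - 1 = (a : Int) := by ring
    rw [hc1]
    have hidx : (t : Int) - 1 - (a : Int) = (((t - 1 - a : Nat)) : Int) := by omega
    rw [hidx, PySem.List.pySetD_natCast]
    have hlen : (l.set (t - 1 - a) (PySem.List.pyGetD aux (a : Int) "")).length = t := by
      simp [hl]
    rw [ih (by omega) _ hlen k hk]
    split_ifs with h1 h2 h2
    · rfl
    · exact absurd (by omega : t - (a + 1) ≤ k) h2
    · have hkk : t - 1 - a = k := by omega
      rw [hkk, List.getElem?_set_eq_of_lt _ (by omega)]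
      have hval : PySem.List.pyGetD aux (a : Int) "" = aux.getD a "" := PySem.List.pyGetD_natCast ..
      rw [hval]
      have hak : t - 1 - k = a := by omega
      rw [hak, List.getD_eq_getElem?_getD, List.getElem?_eq_getElem (by omega)]
      rfl
    · rw [List.getElem?_set_ne (by omega)]

-- A on a nonempty list, pointwise
theorem pvAGet (x : String) (xs : List String) (p : Int) (k : Nat) (hk : k < xs.length) :
    (removeParteDiamante (x :: xs) p)[k]? =
    if ((k : Int) + 1) ≠ p then xs[k]? else some "" := by
  simp only [removeParteDiamante, List.length_cons]
  push_cast
  rw [show (xs.length : Int) + 1 - 1 = ((xs.length : Nat) : Int) from by ring]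
  rw [Int.toNat_natCast]
  have haux : ((PySem.List.pyRange ((xs.length : Nat) : Int) 0 (-1)).foldl
      (fun aux i => if i ≠ p then PySem.List.pySetD aux (((xs.length : Nat) : Int) - i) (PySem.List.pyGetD (x :: xs) i "") else aux)
      (List.replicate xs.length "")).length = xs.length := by
    rw [pvFoldlLength _ (by intro l b; split <;> simp [PySem.List.length_pySetD])]
    simp
  rw [haux, Int.toNat_natCast]
  rw [pvLoop2Get _ xs.length haux xs.length le_rfl _ (by simp) k hk, if_pos (by omega)]
  have h1 := pvLoop1Get (fun i => PySem.List.pyGetD (x :: xs) i "") p xs.length xs.length le_rfl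
    (List.replicate xs.length "") (by simp) (xs.length - 1 - k) (by omega)
  simp only [] at h1
  rw [h1]
  have hc : (xs.length : Int) - ((xs.length - 1 - k : Nat) : Int) = (((k + 1 : Nat)) : Int) := by omega
  rw [hc, PySem.List.pyGetD_natCast, List.getD_cons_succ]
  split_ifs with h1' h2' h2'
  · rw [List.getD_eq_getElem _ _ hk, List.getElem?_eq_getElem hk]
  · exact absurd (by push_cast at h1' ⊢; omega : (k : Int) + 1 ≠ p) h2'
  · exact absurd ⟨by omega, by push_cast at h2' ⊢; omega⟩ h1'
  · simp [List.getElem?_replicate]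
    omega

theorem pvALen (x : String) (xs : List String) (p : Int) :
    (removeParteDiamante (x :: xs) p).length = xs.length := by
  simp only [removeParteDiamante]
  rw [pvFoldlLength _ (by intro l b; simp [PySem.List.length_pySetD])]
  rw [pvFoldlLength _ (by intro l b; split <;> simp [PySem.List.length_pySetD])]
  simp

-- B on a nonempty list, pointwise
theorem pvBGet (x : String) (xs : List String) (p : Int) (k : Nat) (hk : k < xs.length) :
    (removeParteDiamante_alt (x :: xs) p)[k]? =
    if ((k : Int) + 1) ≠ p then xs[k]? else some "" := by
  simp only [removeParteDiamante_alt, PySem.List.slice_from_one, List.tail_cons, List.length_cons]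
  push_cast
  rw [show (xs.length : Int) + 1 - 1 = (xs.length : Int) from by ring]
  by_cases hp : 1 ≤ p ∧ p ≤ (xs.length : Int)
  · rw [if_pos hp]
    rw [show p - 1 = (((p - 1).toNat : Nat) : Int) from by omega, PySem.List.pySetD_natCast]
    by_cases hkp : (k : Int) + 1 = p
    · rw [if_neg (not_not_intro hkp)]
      have hq : (p - 1).toNat = k := by omega
      rw [hq, List.getElem?_set_eq_of_lt _ hk]
    · rw [if_pos hkp]
      rw [List.getElem?_set_ne (by omega)]
  · rw [if_neg hp, if_pos (by intro h; exact hp ⟨by omega, by omega⟩)]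

theorem pvBLen (x : String) (xs : List String) (p : Int) :
    (removeParteDiamante_alt (x :: xs) p).length = xs.length := by
  simp only [removeParteDiamante_alt, PySem.List.slice_from_one, List.tail_cons]
  split_ifs <;> simp [PySem.List.length_pySetD]

-- ===== VERDICT (by name: the statement is the Claim_ definition above) =====
theorem removeParteDiamante_spec : Claim_equal_removeParteDiamante := by
  intro linha posicao _
  unfold Spec_removeParteDiamante
  cases linha with
  | nil =>
    have hA : removeParteDiamante [] posicao = [] := by
      simp [removeParteDiamante, PySem.List.pyRange_neg_one_eq_nil]
    have hB : removeParteDiamante_alt [] posicao = [] := by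
      simp only [removeParteDiamante_alt]
      split_ifs with h
      · exfalso; simp at h; omega
      · simp [PySem.List.slice]
    rw [hA, hB]
  | cons x xs =>
    apply List.ext_getElem?
    intro k
    by_cases hk : k < xs.length
    · rw [pvAGet x xs posicao k hk, pvBGet x xs posicao k hk]
    · rw [List.getElem?_eq_none (by rw [pvALen]; omega),
          List.getElem?_eq_none (by rw [pvBLen]; omega)]
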